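-- pv_equiv track=rewrite | github.com/HariWu1995/ocriesdp | models/heads/dependency/SPADE/postprocess.py | gen_root_fg_parses
-- ===== SOURCE A (Python) =====
-- def get_key_from_single_key_dict(f_parse1):
--     target_field_list = list(f_parse1.keys())
--     assert len(target_field_list) == 1
--     field_of_target = target_field_list[0]
--
--     return field_of_target
--
-- def gen_root_fg_parses(field_roots, root_f_parses, root_f_parse_head_ids, grouped_col_ids, parses):
--     parses_root = []
--     for b, parse in enumerate(parses):
--         representer_col_id = list(grouped_col_ids[b].keys())
--         parse_root = []
--         for field_root in field_roots:
--             new_parse = []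
--             for root_f_parse1, root_f_parse_head_id1 in zip(root_f_parses[b], root_f_parse_head_ids[b]):
--                 k = get_key_from_single_key_dict(root_f_parse1)
--                 if k == field_root:
--                     if root_f_parse_head_id1 in representer_col_id:
--                         idx = representer_col_id.index(root_f_parse_head_id1)
--                         new_parse.append(parse[idx])
--
--             parse_root.append(new_parse)
--         parses_root.append(parse_root)
--
--     return parses_root
-- ===== SOURCE B (Python) =====
-- def get_key_from_single_key_dict(f_parse1):
--     target_field_list = list(f_parse1.keys())
--     assert len(target_field_list) == 1
--     field_of_target = target_field_list[0]
--
--     return field_of_target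
--
-- def gen_root_fg_parses(field_roots, root_f_parses, root_f_parse_head_ids, grouped_col_ids, parses):
--     field_set = set(field_roots)
--     parses_root = []
--     for b, parse in enumerate(parses):
--         # index the representer columns once: col_id -> position
--         col_index = {c: i for i, c in enumerate(grouped_col_ids[b])}
--         # one pass over the batch: bucket parse cells by their root field key
--         groups = {}
--         for f_parse1, head_id in zip(root_f_parses[b], root_f_parse_head_ids[b]):
--             k = next(iter(f_parse1), None)
--             if k in field_set and head_id in col_index:
--                 groups.setdefault(k, []).append(parse[col_index[head_id]])
--         parses_root.append([list(groups.get(fr, [])) for fr in field_roots])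
--     return parses_root
-- ===== Notes on version B (the rewrite author's own statement) =====
-- stated objective: faster
-- what changed: Instead of rescanning the whole batch of root_f_parses once per field_root with a repeated list(...).index lookup, B builds a col_id->position dict once per batch, buckets the parse cells by field key in a single pass over zip(root_f_parses[b], root_f_parse_head_ids[b]), and then emits [groups.get(fr, []) for fr in field_roots].
import Mathlib
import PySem

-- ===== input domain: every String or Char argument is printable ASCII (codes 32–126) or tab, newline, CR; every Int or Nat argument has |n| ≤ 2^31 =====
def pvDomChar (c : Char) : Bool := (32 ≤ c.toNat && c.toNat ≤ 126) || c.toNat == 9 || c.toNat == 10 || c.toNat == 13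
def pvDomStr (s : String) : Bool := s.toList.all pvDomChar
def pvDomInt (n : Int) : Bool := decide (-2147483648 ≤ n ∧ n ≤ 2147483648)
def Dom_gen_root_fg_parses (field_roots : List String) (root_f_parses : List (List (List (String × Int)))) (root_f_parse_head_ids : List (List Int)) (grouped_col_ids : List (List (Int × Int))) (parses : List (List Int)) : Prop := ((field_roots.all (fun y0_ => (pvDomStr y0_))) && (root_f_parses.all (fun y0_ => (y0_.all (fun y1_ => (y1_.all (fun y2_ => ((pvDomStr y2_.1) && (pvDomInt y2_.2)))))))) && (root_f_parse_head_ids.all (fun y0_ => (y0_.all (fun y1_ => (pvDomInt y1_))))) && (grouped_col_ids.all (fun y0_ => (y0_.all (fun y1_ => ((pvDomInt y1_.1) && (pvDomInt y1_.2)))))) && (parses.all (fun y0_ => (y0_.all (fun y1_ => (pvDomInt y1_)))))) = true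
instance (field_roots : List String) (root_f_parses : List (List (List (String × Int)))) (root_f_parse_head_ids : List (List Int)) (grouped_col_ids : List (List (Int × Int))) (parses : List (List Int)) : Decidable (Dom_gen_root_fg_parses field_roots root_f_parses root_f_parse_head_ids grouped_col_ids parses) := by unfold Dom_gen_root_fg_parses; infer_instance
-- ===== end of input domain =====

-- B replaces A's per-field_root rescan of the batch by one bucketing pass with a col_id→position
-- index built once per batch (objective: faster, O(F·N·C) → O(F+N+C) per batch); return value only.

-- ===== PORT A =====
-- dicts are association lists: list(d.keys()) = first-occurrence distinct keys = PySem.List.dedup of the fsts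
def get_key_from_single_key_dict (f_parse1 : List (String × Int)) : String :=
  let target_field_list := PySem.List.dedup (f_parse1.map Prod.fst)
  -- assert len == 1 raises AssertionError otherwise (excluded by Pre_); [0] on the singleton:
  PySem.List.pyGetD target_field_list 0 ""

def gen_root_fg_parses (field_roots : List String) (root_f_parses : List (List (List (String × Int)))) (root_f_parse_head_ids : List (List Int)) (grouped_col_ids : List (List (Int × Int))) (parses : List (List Int)) : List (List (List Int)) :=
  (PySem.List.enumerate parses).foldl (fun parses_root bp =>
    let b := bp.1; let parse := bp.2
    let representer_col_id := PySem.List.dedup ((PySem.List.pyGetD grouped_col_ids b []).map Prod.fst)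
    let parse_root := field_roots.foldl (fun pr field_root =>
      let new_parse := (List.zip (PySem.List.pyGetD root_f_parses b []) (PySem.List.pyGetD root_f_parse_head_ids b [])).foldl (fun np q =>
        let k := get_key_from_single_key_dict q.1
        if k = field_root then
          if q.2 ∈ representer_col_id then
            let idx := (PySem.List.index? representer_col_id q.2).getD 0
            np ++ [PySem.List.pyGetD parse (idx : Int) 0]   -- parse[idx]; IndexError excluded by Pre_
          else np
        else np) []
      pr ++ [new_parse]) []
    parses_root ++ [parse_root]) []

-- ===== PORT B =====
def gen_root_fg_parses_alt (field_roots : List String) (root_f_parses : List (List (List (String × Int)))) (root_f_parse_head_ids : List (List Int)) (grouped_col_ids : List (List (Int × Int))) (parses : List (List Int)) : List (List (List Int)) :=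
  let field_set := PySem.Set.ofList field_roots
  (PySem.List.enumerate parses).foldl (fun parses_root bp =>
    let b := bp.1; let parse := bp.2
    -- col_index = {c: i for i, c in enumerate(grouped_col_ids[b])}
    let col_index : PySem.Dict Int Int :=
      (PySem.List.enumerate (PySem.List.dedup ((PySem.List.pyGetD grouped_col_ids b []).map Prod.fst))).foldl
        (fun d ic => d.insert ic.2 ic.1) PySem.Dict.empty
    -- groups: one pass over zip(root_f_parses[b], root_f_parse_head_ids[b])
    let groups : PySem.Dict String (List Int) :=
      (List.zip (PySem.List.pyGetD root_f_parses b []) (PySem.List.pyGetD root_f_parse_head_ids b [])).foldl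
        (fun g q =>
          match (PySem.List.dedup (q.1.map Prod.fst)).head? with   -- next(iter(f_parse1), None)
          | some k =>
            if k ∈ field_set then
              match col_index.get? q.2 with
              | some i => g.modify k [] (· ++ [PySem.List.pyGetD parse i 0])   -- setdefault(k, []).append(parse[col_index[head]])
              | none => g
            else g
          | none => g) PySem.Dict.empty
    parses_root ++ [field_roots.map (fun fr => groups.getD fr [])]) []

-- ===== PRECONDITION & SPEC =====
-- Pre_ excludes exactly the inputs where the Python A raises: a batch index of parses beyond one of the
-- three parallel lists (IndexError), a root_f_parses dict without exactly one key reached while field_roots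
-- is non-empty (AssertionError), and a matched representer column whose position is past len(parse) (IndexError).
def Pre_gen_root_fg_parses (field_roots : List String) (root_f_parses : List (List (List (String × Int)))) (root_f_parse_head_ids : List (List Int)) (grouped_col_ids : List (List (Int × Int))) (parses : List (List Int)) : Prop :=
  parses.length ≤ root_f_parses.length ∧ parses.length ≤ root_f_parse_head_ids.length ∧
  parses.length ≤ grouped_col_ids.length ∧
  ∀ b ∈ List.range parses.length,
    ∀ q ∈ List.zip (root_f_parses.getD b []) (root_f_parse_head_ids.getD b []),
      (field_roots ≠ [] → (PySem.List.dedup (q.1.map Prod.fst)).length = 1) ∧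
      (∀ k ∈ PySem.List.dedup (q.1.map Prod.fst), k ∈ field_roots →
        ∀ i ∈ (PySem.List.index? (PySem.List.dedup ((grouped_col_ids.getD b []).map Prod.fst)) q.2).toList,
          i < (parses.getD b []).length)
instance (field_roots : List String) (root_f_parses : List (List (List (String × Int)))) (root_f_parse_head_ids : List (List Int)) (grouped_col_ids : List (List (Int × Int))) (parses : List (List Int)) : Decidable (Pre_gen_root_fg_parses field_roots root_f_parses root_f_parse_head_ids grouped_col_ids parses) := by unfold Pre_gen_root_fg_parses; infer_instance

def pvWitness_gen_root_fg_parses : List String × (List (List (List (String × Int)))) × List (List Int) × (List (List (Int × Int))) × List (List Int) :=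
  (["name", "price"],
   [[[("name", 3)], [("price", 7)], [("qty", 1)]], [[("name", 0)]]],
   [[4, 9, 4], [2]],
   [[(4, 0), (9, 1)], [(2, 5), (3, 6)]],
   [[10, 20], [30, 40]])

def Spec_gen_root_fg_parses (field_roots : List String) (root_f_parses : List (List (List (String × Int)))) (root_f_parse_head_ids : List (List Int)) (grouped_col_ids : List (List (Int × Int))) (parses : List (List Int)) (out : List (List (List Int))) : Prop := out = gen_root_fg_parses_alt field_roots root_f_parses root_f_parse_head_ids grouped_col_ids parses
instance (field_roots : List String) (root_f_parses : List (List (List (String × Int)))) (root_f_parse_head_ids : List (List Int)) (grouped_col_ids : List (List (Int × Int))) (parses : List (List Int)) (out : List (List (List Int))) : Decidable (Spec_gen_root_fg_parses field_roots root_f_parses root_f_parse_head_ids grouped_col_ids parses out) := by unfold Spec_gen_root_fg_parses; infer_instance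

-- ===== CLAIM (what is proved, stated in full; the proofs are below) =====
def Claim_equal_gen_root_fg_parses : Prop := ∀ (field_roots : List String) (root_f_parses : List (List (List (String × Int)))) (root_f_parse_head_ids : List (List Int)) (grouped_col_ids : List (List (Int × Int))) (parses : List (List Int)), Dom_gen_root_fg_parses field_roots root_f_parses root_f_parse_head_ids grouped_col_ids parses → Pre_gen_root_fg_parses field_roots root_f_parses root_f_parse_head_ids grouped_col_ids parses → Spec_gen_root_fg_parses field_roots root_f_parses root_f_parse_head_ids grouped_col_ids parses (gen_root_fg_parses field_roots root_f_parses root_f_parse_head_ids grouped_col_ids parses)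

-- ===== LEMMAS AND PROOFS =====

theorem pvWitness_ok :
    Pre_gen_root_fg_parses (pvWitness_gen_root_fg_parses.1) (pvWitness_gen_root_fg_parses.2.1) (pvWitness_gen_root_fg_parses.2.2.1) (pvWitness_gen_root_fg_parses.2.2.2.1) (pvWitness_gen_root_fg_parses.2.2.2.2) := by
  decide

-- B's per-element effect on the bucket dict, as an optional (key, value) pair
def pvKV (fs : PySem.Set String) (ci : PySem.Dict Int Int) (parse : List Int)
    (q : (List (String × Int)) × Int) : Option (String × Int) :=
  match (PySem.List.dedup (q.1.map Prod.fst)).head? with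
  | some k =>
    if k ∈ fs then
      match ci.get? q.2 with
      | some i => some (k, PySem.List.pyGetD parse i 0)
      | none => none
    else none
  | none => none

-- A's per-element effect, as an optional (key, value) pair (before the field_root filter)
def pvKA (K : List Int) (parse : List Int) (q : (List (String × Int)) × Int) : Option (String × Int) :=
  if q.2 ∈ K then
    some (get_key_from_single_key_dict q.1,
          parse.getD ((PySem.List.index? K q.2).getD 0) 0)
  else none

-- the dict comprehension {c: i for i, c in enumerate(K)} looks up the position of h in K
theorem pv_colfold (K : List Int) (hK : K.Nodup) :
    ∀ (s : Int) (d : PySem.Dict Int Int) (h : Int),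
      ((PySem.List.enumerate K s).foldl (fun d ic => d.insert ic.2 ic.1) d).get? h
        = match PySem.List.index? K h with
          | some n => some (s + n)
          | none => d.get? h := by
  induction K with
  | nil => intro s d h; simp [PySem.List.enumerate, PySem.List.index?]
  | cons x K ih =>
    intro s d h
    rw [PySem.List.enumerate_cons]
    simp only [List.foldl_cons]
    rw [List.nodup_cons] at hK
    rcases hK with ⟨hx, hK'⟩
    by_cases hxh : x = h
    · subst hxh
      rw [ih hK' (s + 1) (d.insert x s) x]
      rw [PySem.List.index?_cons_self]
      have hnone : PySem.List.index? K x = none := (PySem.List.index?_eq_none_iff K x).mpr hx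
      rw [hnone]
      simp [PySem.Dict.get?_insert_self]
    · rw [ih hK' (s + 1) (d.insert x s) h]
      rw [PySem.List.index?_cons_of_ne K hxh]
      cases hi : PySem.List.index? K h with
      | some n => simp only [Option.map_some]; congr 1; push_cast; ring
      | none => simp only [Option.map_none]; exact PySem.Dict.get?_insert_of_ne d s (Ne.symm hxh)

-- B's bucketing pass, characterised: bucket c holds the values of the pairs keyed c, in order
theorem pv_groupfold (fs : PySem.Set String) (ci : PySem.Dict Int Int) (parse : List Int)
    (L : List ((List (String × Int)) × Int)) :
    ∀ (g : PySem.Dict String (List Int)) (c : String),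
      (L.foldl (fun g q =>
          match (PySem.List.dedup (q.1.map Prod.fst)).head? with
          | some k =>
            if k ∈ fs then
              match ci.get? q.2 with
              | some i => g.modify k [] (· ++ [PySem.List.pyGetD parse i 0])
              | none => g
            else g
          | none => g) g).getD c []
        = g.getD c [] ++ ((L.filterMap (pvKV fs ci parse)).filter (fun p => p.1 = c)).map Prod.snd := by
  induction L with
  | nil => intro g c; simp
  | cons q L ih =>
    intro g c
    simp only [List.foldl_cons, List.filterMap_cons]
    have hstep : (match (PySem.List.dedup (q.1.map Prod.fst)).head? with
          | some k =>
            if k ∈ fs then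
              match ci.get? q.2 with
              | some i => g.modify k [] (· ++ [PySem.List.pyGetD parse i 0])
              | none => g
            else g
          | none => g)
        = (match pvKV fs ci parse q with
          | some kv => g.modify kv.1 [] (· ++ [kv.2])
          | none => g) := by
      unfold pvKV
      cases (PySem.List.dedup (q.1.map Prod.fst)).head? with
      | none => rfl
      | some k =>
        by_cases hk : k ∈ fs
        · simp only [hk, if_true]
          cases ci.get? q.2 <;> rfl
        · simp only [hk, if_false]
    rw [hstep]
    cases hkv : pvKV fs ci parse q with
    | none => rw [ih g c]
    | some kv =>
      rw [ih (g.modify kv.1 [] (· ++ [kv.2])) c]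
      rw [PySem.Dict.getD_modify]
      by_cases hc : c = kv.1
      · simp [hc, List.append_assoc]
      · have hc' : ¬ (kv.1 = c) := fun h => hc h.symm
        simp [hc, hc']

-- A's inner accumulation over the zip, characterised the same way
theorem pv_afold (fr : String) (K : List Int) (parse : List Int)
    (L : List ((List (String × Int)) × Int)) :
    ∀ (np : List Int),
      (L.foldl (fun np q =>
        if get_key_from_single_key_dict q.1 = fr then
          if q.2 ∈ K then
            np ++ [parse.getD ((PySem.List.index? K q.2).getD 0) 0]
          else np
        else np) np)
        = np ++ ((L.filterMap (pvKA K parse)).filter (fun p => p.1 = fr)).map Prod.snd := by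
  induction L with
  | nil => intro np; simp
  | cons q L ih =>
    intro np
    simp only [List.foldl_cons, List.filterMap_cons]
    by_cases hq : q.2 ∈ K
    · by_cases hk : get_key_from_single_key_dict q.1 = fr
      · rw [ih]; simp [pvKA, hq, hk, List.append_assoc]
      · rw [ih]; simp [pvKA, hq, hk]
    · by_cases hk : get_key_from_single_key_dict q.1 = fr
      · rw [ih]; simp [pvKA, hq, hk]
      · rw [ih]; simp [pvKA, hq, hk]

-- under Pre_'s singleton-key guarantee the two per-element views agree after the field filter
theorem pv_lists_eq (field_roots : List String) (K : List Int) (ci : PySem.Dict Int Int)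
    (parse : List Int) (fr : String) (hfr : fr ∈ field_roots)
    (hci : ∀ h : Int, ci.get? h = (PySem.List.index? K h).map (fun n => (n : Int)))
    (L : List ((List (String × Int)) × Int))
    (hL : ∀ q ∈ L, (PySem.List.dedup (q.1.map Prod.fst)).length = 1) :
    (L.filterMap (pvKA K parse)).filter (fun p => p.1 = fr)
      = (L.filterMap (pvKV (PySem.Set.ofList field_roots) ci parse)).filter (fun p => p.1 = fr) := by
  induction L with
  | nil => simp
  | cons q L ih =>
    have hq := hL q (List.mem_cons_self ..)
    obtain ⟨k, hk⟩ := List.length_eq_one_iff.mp hq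
    have hkey : get_key_from_single_key_dict q.1 = k := by
      unfold get_key_from_single_key_dict
      rw [hk, PySem.List.pyGetD_zero_cons]
    have ihL : ∀ q' ∈ L, (PySem.List.dedup (q'.1.map Prod.fst)).length = 1 :=
      fun q' hq' => hL q' (List.mem_cons_of_mem _ hq')
    simp only [List.filterMap_cons]
    have hhead : (PySem.List.dedup (q.1.map Prod.fst)).head? = some k := by rw [hk]; rfl
    by_cases hmem : q.2 ∈ K
    · obtain ⟨n, hn⟩ := Option.isSome_iff_exists.mp ((PySem.List.index?_isSome_iff K q.2).mpr hmem)
      have hA : pvKA K parse q = some (k, parse.getD n 0) := by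
        unfold pvKA; rw [if_pos hmem, hkey, hn]; rfl
      by_cases hkfs : k ∈ field_roots
      · have hB : pvKV (PySem.Set.ofList field_roots) ci parse q
            = some (k, parse.getD n 0) := by
          unfold pvKV
          rw [hhead]
          simp only [if_pos ((PySem.Set.mem_ofList field_roots k).mpr hkfs)]
          rw [hci q.2, hn]
          simp
        rw [hA, hB, List.filter_cons, List.filter_cons, ih ihL]
      · have hkfr : ¬ (k = fr) := fun h => hkfs (h ▸ hfr)
        have hB : pvKV (PySem.Set.ofList field_roots) ci parse q = none := by
          unfold pvKV
          rw [hhead]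
          simp only [if_neg (fun h => hkfs ((PySem.Set.mem_ofList field_roots k).mp h))]
        rw [hA, hB, List.filter_cons]
        simp only [hkfr, decide_false, if_neg, Bool.false_eq_true, not_false_iff]
        exact ih ihL
    · have hA : pvKA K parse q = none := by unfold pvKA; rw [if_neg hmem]
      have hB : pvKV (PySem.Set.ofList field_roots) ci parse q = none := by
        unfold pvKV
        rw [hhead]
        by_cases hkfs : k ∈ PySem.Set.ofList field_roots
        · simp only [if_pos hkfs]
          rw [hci q.2, (PySem.List.index?_eq_none_iff K q.2).mpr hmem]
          rfl
        · simp only [if_neg hkfs]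
      rw [hA, hB, ih ihL]

-- ===== VERDICT (by name: the statement is the Claim_ definition above) =====
theorem gen_root_fg_parses_spec : Claim_equal_gen_root_fg_parses := by
  intro field_roots root_f_parses root_f_parse_head_ids grouped_col_ids parses _dom hpre
  unfold Spec_gen_root_fg_parses
  unfold gen_root_fg_parses gen_root_fg_parses_alt
  simp only []
  rw [PySem.List.foldl_append_singleton_eq_map, PySem.List.foldl_append_singleton_eq_map]
  simp only [List.nil_append]
  apply List.map_congr_left
  intro bp hbp
  obtain ⟨kb, hkb, hbp_eq⟩ := (PySem.List.mem_enumerate_iff parses 0 bp).mp hbp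
  obtain ⟨hpre1, hpre2, hpre3, hpre4⟩ := hpre
  subst hbp_eq
  simp only [zero_add, PySem.List.pyGetD_natCast]
  rw [PySem.List.foldl_append_singleton_eq_map]
  simp only [List.nil_append]
  apply List.map_congr_left
  intro fr hfr
  have hfrne : field_roots ≠ [] := by rintro rfl; exact absurd hfr List.not_mem_nil
  have hpreb := hpre4 kb (List.mem_range.mpr hkb)
  have hL : ∀ q ∈ List.zip (root_f_parses.getD kb []) (root_f_parse_head_ids.getD kb []),
      (PySem.List.dedup (q.1.map Prod.fst)).length = 1 :=
    fun q hq => (hpreb q hq).1 hfrne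
  have hci : ∀ h : Int,
      ((PySem.List.enumerate (PySem.List.dedup ((grouped_col_ids.getD kb []).map Prod.fst)) 0).foldl
          (fun d ic => d.insert ic.2 ic.1) PySem.Dict.empty).get? h
        = (PySem.List.index? (PySem.List.dedup ((grouped_col_ids.getD kb []).map Prod.fst)) h).map
            (fun n => (n : Int)) := by
    intro h
    rw [pv_colfold _ (PySem.List.nodup_dedup _) 0 PySem.Dict.empty h]
    cases PySem.List.index? (PySem.List.dedup ((grouped_col_ids.getD kb []).map Prod.fst)) h <;> simp
  rw [pv_afold, pv_groupfold]
  simp only [List.nil_append, PySem.Dict.getD_empty]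
  rw [pv_lists_eq field_roots _ _ _ fr hfr hci _ hL]
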